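-- pv_equiv track=rewrite | github.com/JanithRavisanka/singlish-english-translator | Archive/transliteration/preprocess.py | handle_numbers
-- ===== SOURCE A (Python) =====
-- def handle_numbers(text):
--     """
--     Extract numbers from text and store their positions.
--
--     Args:
--         text: Input string
--
--     Returns:
--         tuple: (text_without_numbers, number_map)
--                number_map is a list of (position, number_string) tuples
--     """
--     number_map = []
--     clean_chars = []
--     i = 0
--
--     while i < len(text):
--         if text[i].isdigit():
--             # Collect the full number
--             number = ""
--             while i < len(text) and text[i].isdigit():
--                 number += text[i]
--                 i += 1
--             # Store number and its position
--             number_map.append((len(clean_chars), number))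
--         else:
--             clean_chars.append(text[i])
--             i += 1
--
--     clean_text = ''.join(clean_chars)
--     return clean_text, number_map
-- ===== SOURCE B (Python) =====
-- def handle_numbers(text):
--     """Single fold over characters with a digit buffer flushed on each
--     non-digit (and once at the end); no nested loop, no index arithmetic."""
--     clean = []
--     nmap = []
--     buf = []
--     for ch in text:
--         if ch.isdigit():
--             buf.append(ch)
--         else:
--             if buf:
--                 nmap.append((len(clean), ''.join(buf)))
--                 buf = []
--             clean.append(ch)
--     if buf:
--         nmap.append((len(clean), ''.join(buf)))
--     return ''.join(clean), nmap
-- ===== Notes on version B (the rewrite author's own statement) =====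
-- stated objective: idiomatic
-- what changed: Replaces A's nested index-based while loops (inner loop collecting each number via quadratic string +=) by a single for-each fold carrying a digit buffer in its state, flushed into the map at each non-digit and once after the loop.
import Mathlib
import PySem

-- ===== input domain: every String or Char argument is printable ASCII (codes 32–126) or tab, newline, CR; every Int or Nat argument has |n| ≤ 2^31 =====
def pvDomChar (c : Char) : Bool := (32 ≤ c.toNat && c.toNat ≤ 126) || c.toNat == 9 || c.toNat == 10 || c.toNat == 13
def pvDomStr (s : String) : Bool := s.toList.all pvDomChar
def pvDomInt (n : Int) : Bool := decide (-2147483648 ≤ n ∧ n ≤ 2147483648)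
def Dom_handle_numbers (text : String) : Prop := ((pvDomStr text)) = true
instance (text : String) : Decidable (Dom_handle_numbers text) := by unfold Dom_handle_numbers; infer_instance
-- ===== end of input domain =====

-- B replaces A's nested index-based while loops by a single for-each fold carrying a
-- digit buffer, flushed at each non-digit and once at the end; same cost, plainer shape.

-- ===== PORT A =====
-- A's inner "while i < len(text) and text[i].isdigit(): number += text[i]; i += 1"
-- (entered with text[i] already a digit, so the first iteration is the [c] seed)
def pvTakeNum : List Char → List Char → (List Char × List Char)
  | [], num => (num, [])
  | c :: rest, num =>
    if PySem.Chars.isdigit c then pvTakeNum rest (num ++ [c]) else (num, c :: rest)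

theorem pvTakeNum_snd_length_le (cs num : List Char) :
    (pvTakeNum cs num).2.length ≤ cs.length := by
  induction cs generalizing num with
  | nil => simp [pvTakeNum]
  | cons c rest ih =>
    simp only [pvTakeNum]
    split
    · exact Nat.le_succ_of_le (ih _)
    · simp

-- A's outer while loop: clean chars accumulated one by one, numbers collected by the inner loop
def pvGoA : List Char → List Char → List (Int × String) → (List Char × List (Int × String))
  | [], clean, nmap => (clean, nmap)
  | c :: rest, clean, nmap =>
    if PySem.Chars.isdigit c then
      let p := pvTakeNum rest [c]
      pvGoA p.2 clean (nmap ++ [((clean.length : Int), String.ofList p.1)])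
    else
      pvGoA rest (clean ++ [c]) nmap
termination_by cs => cs.length
decreasing_by
  · exact Nat.lt_succ_of_le (pvTakeNum_snd_length_le rest [c])
  · simp

def handle_numbers (text : String) : String × (List (Int × String)) :=
  -- ''.join(clean_chars) over single characters is exactly String.ofList of the char list
  let p := pvGoA text.toList [] []
  (String.ofList p.1, p.2)

-- ===== PORT B =====
-- Source B's loop body: state is (clean, nmap, buf)
def pvStepB (st : List Char × List (Int × String) × List Char) (ch : Char) :
    List Char × List (Int × String) × List Char :=
  let (clean, nmap, buf) := st
  if PySem.Chars.isdigit ch then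
    (clean, nmap, buf ++ [ch])
  else if buf.isEmpty then
    (clean ++ [ch], nmap, buf)
  else
    (clean ++ [ch], nmap ++ [((clean.length : Int), String.ofList buf)], [])

-- Source B's final "if buf: nmap.append(...)"
def pvFlushB (st : List Char × List (Int × String) × List Char) :
    List Char × List (Int × String) :=
  let (clean, nmap, buf) := st
  (clean, if buf.isEmpty then nmap else nmap ++ [((clean.length : Int), String.ofList buf)])

def handle_numbers_alt (text : String) : String × (List (Int × String)) :=
  -- ''.join over single characters is String.ofList of the accumulated char list
  let p := pvFlushB (text.toList.foldl pvStepB ([], [], []))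
  (String.ofList p.1, p.2)

-- ===== PRECONDITION & SPEC =====
def Spec_handle_numbers (text : String) (out : String × (List (Int × String))) : Prop := out = handle_numbers_alt text
instance (text : String) (out : String × (List (Int × String))) : Decidable (Spec_handle_numbers text out) := by unfold Spec_handle_numbers; infer_instance

-- ===== CLAIM (what is proved, stated in full; the proofs are below) =====
def Claim_equal_handle_numbers : Prop := ∀ (text : String), Dom_handle_numbers text → Spec_handle_numbers text (handle_numbers text)

-- ===== LEMMAS AND PROOFS =====

theorem pvTakeNum_eq (cs num : List Char) :
    pvTakeNum cs num =
      (num ++ cs.takeWhile PySem.Chars.isdigit, cs.dropWhile PySem.Chars.isdigit) := by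
  induction cs generalizing num with
  | nil => simp [pvTakeNum]
  | cons c rest ih =>
    simp only [pvTakeNum, List.takeWhile, List.dropWhile]
    by_cases h : PySem.Chars.isdigit c
    · simp [h, ih]
    · simp [h]

-- folding B's step over a run of digits just extends the buffer
theorem pvFoldB_digits (t : List Char) (h : ∀ c ∈ t, PySem.Chars.isdigit c = true) :
    ∀ rest clean nmap buf,
      List.foldl pvStepB (clean, nmap, buf) (t ++ rest) =
        List.foldl pvStepB (clean, nmap, buf ++ t) rest := by
  induction t with
  | nil => intro rest clean nmap buf; simp
  | cons c ts ih =>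
    intro rest clean nmap buf
    rw [List.cons_append, List.foldl_cons]
    simp only [pvStepB, h c (by simp), if_true]
    rw [ih (fun d hd => h d (by simp [hd]))]
    simp

theorem pvDropWhile_head_false (p : Char → Bool) (l : List Char) :
    ∀ x xs, l.dropWhile p = x :: xs → p x = false := by
  induction l with
  | nil => intro x xs h; simp [List.dropWhile] at h
  | cons c rest ih =>
    intro x xs h
    rw [List.dropWhile] at h
    by_cases hc : p c
    · exact ih x xs (by simpa [hc] using h)
    · simp [hc] at h
      simp [← h.1, hc]

theorem pvMainB : ∀ (n : Nat) (cs clean : List Char) (nmap : List (Int × String)),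
    cs.length = n →
    pvFlushB (List.foldl pvStepB (clean, nmap, []) cs) = pvGoA cs clean nmap := by
  intro n
  induction n using Nat.strong_induction_on with
  | _ n IH =>
    intro cs clean nmap hlen
    match cs with
    | [] => simp [pvFlushB, pvGoA]
    | c :: rest =>
      by_cases h : PySem.Chars.isdigit c = true
      · rw [pvGoA]
        simp only [h, if_true, pvTakeNum_eq]
        rw [List.foldl_cons]
        simp only [pvStepB, h, if_true, List.nil_append]
        have hsplit : rest = rest.takeWhile PySem.Chars.isdigit
            ++ rest.dropWhile PySem.Chars.isdigit :=
          (List.takeWhile_append_dropWhile).symm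
        conv_lhs => rw [hsplit]
        rw [pvFoldB_digits _ (fun d hd => List.mem_takeWhile_imp hd)]
        set d := rest.dropWhile PySem.Chars.isdigit with hd
        have hdle : d.length ≤ rest.length := List.length_dropWhile_le _ _
        match hdm : d with
        | [] =>
          simp [pvFlushB, pvGoA]
        | c' :: rest' =>
          have hc' : PySem.Chars.isdigit c' = false :=
            pvDropWhile_head_false _ rest c' rest' hd.symm
          rw [List.foldl_cons]
          simp only [pvStepB, hc', Bool.false_eq_true, if_false, List.cons_append,
            List.isEmpty_cons]
          rw [pvGoA]
          simp only [hc', Bool.false_eq_true, if_false]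
          refine IH rest'.length ?_ _ _ _ rfl
          simp only [List.length_cons] at hlen hdle
          omega
      · rw [List.foldl_cons, pvGoA]
        simp only [pvStepB, h, Bool.false_eq_true, if_false, List.isEmpty_nil, if_true]
        refine IH rest.length ?_ _ _ _ rfl
        simp only [List.length_cons] at hlen
        omega

-- ===== VERDICT (by name: the statement is the Claim_ definition above) =====
theorem handle_numbers_spec : Claim_equal_handle_numbers := by
  intro text _
  unfold Spec_handle_numbers handle_numbers handle_numbers_alt
  rw [pvMainB text.toList.length text.toList [] [] rfl]
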